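-- pv_equiv track=rewrite | github.com/arpane4c5/batsman_pose_track | tools/create_stroke_labels.py | getListOfShots
-- ===== SOURCE A (Python) =====
-- def getListOfShots(shotLabels):
--     shots = []
--     start, end = -1, -1
--     for i,isShot in enumerate(shotLabels):
--         if isShot:
--             if start<0:     # First True after a sequence of False
--                 start = i+1
--         else:
--             if start>0:     # First false after a sequence of True
--                 end = i
--                 shots.append((start,end))
--                 start,end = -1,-1
--     return shots
-- ===== SOURCE B (Python) =====
-- def _skip(pred, xs, i):
--     # first index >= i at which pred fails (or len(xs))
--     while i < len(xs) and pred(xs[i]):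
--         i += 1
--     return i
--
-- def getListOfShots(shotLabels):
--     # alternately skip a maximal False-run and a maximal True-run;
--     # a True-run yields an interval only if something follows it
--     shots = []
--     i = 0
--     n = len(shotLabels)
--     while i < n:
--         start = _skip(lambda v: not v, shotLabels, i)
--         i = _skip(lambda v: v, shotLabels, start)
--         if i < n:
--             shots.append((start + 1, i))
--     return shots
-- ===== Notes on version B (the rewrite author's own statement) =====
-- stated objective: alternative
-- what changed: Replaces A's per-element sentinel start/end state machine by a run-splitting pass: alternately consume a maximal False-run and a maximal True-run (a span helper) and emit an interval for each True-run that is followed by anything.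
import Mathlib
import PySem

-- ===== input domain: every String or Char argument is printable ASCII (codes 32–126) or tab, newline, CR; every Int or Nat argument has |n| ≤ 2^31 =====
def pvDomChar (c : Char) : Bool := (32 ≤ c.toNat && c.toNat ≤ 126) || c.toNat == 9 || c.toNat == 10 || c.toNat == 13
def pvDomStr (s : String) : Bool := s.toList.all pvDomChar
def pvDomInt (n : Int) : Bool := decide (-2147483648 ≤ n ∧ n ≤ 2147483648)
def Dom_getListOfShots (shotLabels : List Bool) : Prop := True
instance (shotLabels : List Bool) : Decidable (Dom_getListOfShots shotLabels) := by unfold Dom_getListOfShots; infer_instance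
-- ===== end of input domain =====

-- B replaces A's sentinel start/end state machine by an index-based run-splitting scan (skip a
-- maximal False-run, then a maximal True-run, emit an interval when the True-run is followed by
-- anything): alternative decomposition, same O(n) cost.


-- ===== PORT A =====
-- the body of A's for-loop, one enumerated element at a time
def pvStepA (st : List (Int × Int) × Int × Int) (p : Int × Bool) : List (Int × Int) × Int × Int :=
  let shots := st.1
  let start := st.2.1
  let en := st.2.2
  if p.2 then
    if start < 0 then (shots, p.1 + 1, en) else (shots, start, en)
  else
    if start > 0 then (shots ++ [(start, p.1)], -1, -1) else (shots, start, en)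

def getListOfShots (shotLabels : List Bool) : List (Int × Int) :=
  ((PySem.List.enumerate shotLabels 0).foldl pvStepA ([], -1, -1)).1

-- ===== PORT B =====
-- port of Source B's _skip: the first index ≥ i at which pred fails (or the length)
def pvSkip (pred : Bool → Bool) (xs : List Bool) (i : Nat) : Nat :=
  if h : i < xs.length then
    if pred xs[i] then pvSkip pred xs (i + 1) else i
  else i
termination_by xs.length - i

-- _skip advances strictly past a nonempty mixed run: needed for the loop's termination
theorem pvSkip_ge (pred : Bool → Bool) (xs : List Bool) : ∀ i, i ≤ pvSkip pred xs i := by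
  intro i
  induction i using pvSkip.induct (pred := pred) (xs := xs) with
  | case1 i h hp ih => rw [pvSkip]; simp only [dif_pos h, if_pos hp]; omega
  | case2 i h hp => rw [pvSkip]; simp [dif_pos h, if_neg hp]
  | case3 i h => rw [pvSkip]; simp [dif_neg h]

theorem pvSkip_progress (xs : List Bool) (i : Nat) (h : i < xs.length) :
    i < pvSkip (fun v => v) xs (pvSkip (fun v => !v) xs i) := by
  have h1 := pvSkip_ge (fun v => !v) xs i
  rcases Nat.eq_or_lt_of_le h1 with heq | hlt
  · -- the False-skip did not move: xs[i] is true, so the True-skip moves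
    have hx : (fun v => !v) xs[i] = false := by
      by_contra hc
      have : pvSkip (fun v => !v) xs i = pvSkip (fun v => !v) xs (i + 1) := by
        rw [pvSkip]; simp [dif_pos h, eq_true_of_ne_false hc]
      have h2 := pvSkip_ge (fun v => !v) xs (i + 1)
      omega
    have hx' : xs[i] = true := by simpa using hx
    have : pvSkip (fun v => v) xs i = pvSkip (fun v => v) xs (i + 1) := by
      rw [pvSkip]; simp [dif_pos h, hx']
    have h2 := pvSkip_ge (fun v => v) xs (i + 1)
    rw [← heq]
    omega
  · have h2 := pvSkip_ge (fun v => v) xs (pvSkip (fun v => !v) xs i)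
    omega

-- port of Source B's while-loop over the state (shots, i), as a tail recursion
def pvLoopB (shots : List (Int × Int)) (xs : List Bool) (i : Nat) : List (Int × Int) :=
  if h : i < xs.length then
    let start := pvSkip (fun v => !v) xs i
    let j := pvSkip (fun v => v) xs start
    let shots' := if j < xs.length then shots ++ [((start : Int) + 1, (j : Int))] else shots
    pvLoopB shots' xs j
  else shots
termination_by xs.length - i
decreasing_by
  have := pvSkip_progress xs i h
  omega

def getListOfShots_alt (shotLabels : List Bool) : List (Int × Int) :=
  pvLoopB [] shotLabels 0

-- ===== PRECONDITION & SPEC =====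
def Spec_getListOfShots (shotLabels : List Bool) (out : List (Int × Int)) : Prop := out = getListOfShots_alt shotLabels
instance (shotLabels : List Bool) (out : List (Int × Int)) : Decidable (Spec_getListOfShots shotLabels out) := by unfold Spec_getListOfShots; infer_instance

-- ===== CLAIM (what is proved, stated in full; the proofs are below) =====
def Claim_equal_getListOfShots : Prop := ∀ (shotLabels : List Bool), Dom_getListOfShots shotLabels → Spec_getListOfShots shotLabels (getListOfShots shotLabels)

-- ===== LEMMAS AND PROOFS =====

-- list-level restatement of B's loop, used only by the proofs below
def pvSpan (pred : Bool → Bool) (xs : List Bool) : List Bool × List Bool :=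
  (xs.takeWhile pred, xs.dropWhile pred)

def pvRunsLoop (shots : List (Int × Int)) (pos : Int) (rest : List Bool) : List (Int × Int) :=
  match rest with
  | [] => shots
  | x :: t =>
    let s1 := pvSpan (fun v => !v) (x :: t)
    let pos1 := pos + (s1.1.length : Int)
    let s2 := pvSpan (fun v => v) s1.2
    let shots' := if s2.2 ≠ [] then shots ++ [(pos1 + 1, pos1 + (s2.1.length : Int))] else shots
    pvRunsLoop shots' (pos1 + (s2.1.length : Int)) s2.2
termination_by rest.length
decreasing_by
  simp only [pvSpan]
  have h1 := List.length_dropWhile_le (fun v => v) (List.dropWhile (fun v => !v) (x :: t))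
  cases x with
  | false =>
    have h2 := List.length_dropWhile_le (fun v => !v) t
    simp only [List.dropWhile_cons, Bool.not_false, if_pos, List.length_cons] at *
    omega
  | true =>
    have h2 := List.length_dropWhile_le (fun v => v) t
    have e1 : List.dropWhile (fun v => !v) (true :: t) = true :: t := by
      simp
    have e2 : List.dropWhile (fun v => v) (true :: t) = List.dropWhile (fun v => v) t := by
      simp
    rw [e1, e2] at *
    simp only [List.length_cons] at *
    omega

-- pvSkip computes takeWhile/dropWhile of the dropped suffix
theorem pvSkip_eq (pred : Bool → Bool) (xs : List Bool) : ∀ i,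
    pvSkip pred xs i = i + (List.takeWhile pred (xs.drop i)).length ∧
    xs.drop (pvSkip pred xs i) = List.dropWhile pred (xs.drop i) := by
  intro i
  induction i using pvSkip.induct (pred := pred) (xs := xs) with
  | case1 i h hp ih =>
    have hd : xs.drop i = xs[i] :: xs.drop (i + 1) := List.drop_eq_getElem_cons h
    rw [pvSkip]
    simp only [dif_pos h, if_pos hp]
    constructor
    · rw [ih.1, hd, List.takeWhile_cons, if_pos hp]
      simp only [List.length_cons]
      omega
    · rw [ih.2, hd, List.dropWhile_cons, if_pos hp]
  | case2 i h hp =>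
    have hd : xs.drop i = xs[i] :: xs.drop (i + 1) := List.drop_eq_getElem_cons h
    rw [pvSkip]
    simp only [dif_pos h, if_neg hp]
    constructor
    · rw [hd, List.takeWhile_cons, if_neg hp]
      simp
    · rw [hd, List.dropWhile_cons, if_neg hp]
  | case3 i h =>
    have hd : xs.drop i = [] := List.drop_eq_nil_of_le (by omega)
    rw [pvSkip]
    simp [dif_neg h, hd]

-- the index loop equals the list-level loop on the dropped suffix
theorem pvBridgeAux : ∀ (K : Nat) (xs : List Bool) (i : Nat), xs.length - i ≤ K →
    ∀ (shots : List (Int × Int)), pvLoopB shots xs i = pvRunsLoop shots (i : Int) (xs.drop i) := by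
  intro K
  induction K with
  | zero =>
    intro xs i hK shots
    have h : ¬ i < xs.length := by omega
    have hd : xs.drop i = [] := List.drop_eq_nil_of_le (by omega)
    rw [pvLoopB]
    simp [dif_neg h, hd, pvRunsLoop]
  | succ K ih =>
    intro xs i hK shots
    by_cases h : i < xs.length
    · have hd : xs.drop i = xs[i] :: xs.drop (i + 1) := List.drop_eq_getElem_cons h
      rw [pvLoopB]
      simp only [dif_pos h]
      rw [hd, pvRunsLoop]
      simp only [pvSpan]
      rw [← hd]
      have h1 := pvSkip_eq (fun v => !v) xs i
      have h2 := pvSkip_eq (fun v => v) xs (pvSkip (fun v => !v) xs i)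
      have hprog := pvSkip_progress xs i h
      have hskip1 := pvSkip_ge (fun v => !v) xs i
      -- name the two skip results
      set start := pvSkip (fun v => !v) xs i with hstart
      set j := pvSkip (fun v => v) xs start with hj
      have e1 : List.dropWhile (fun v => !v) (xs.drop i) = xs.drop start := h1.2.symm
      have e2 : (List.takeWhile (fun v => !v) (xs.drop i)).length = start - i := by omega
      have e3 : List.dropWhile (fun v => v) (xs.drop start) = xs.drop j := h2.2.symm
      have e4 : (List.takeWhile (fun v => v) (xs.drop start)).length = j - start := by omega
      have hjge : start ≤ j := pvSkip_ge (fun v => v) xs start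
      rw [e1, e2, e3, e4]
      have hcast1 : (i : Int) + ((start - i : Nat) : Int) = (start : Int) := by
        push_cast [Nat.cast_sub hskip1]; ring
      have hcast2 : (start : Int) + ((j - start : Nat) : Int) = (j : Int) := by
        push_cast [Nat.cast_sub hjge]; ring
      rw [hcast1, hcast2]
      have hcond : (xs.drop j ≠ []) ↔ (j < xs.length) := by
        constructor
        · intro hne
          by_contra hc
          exact hne (List.drop_eq_nil_of_le (by omega))
        · intro hlt hc
          have := congrArg List.length hc
          simp [List.length_drop] at this
          omega
      have hif : (if xs.drop j ≠ [] then shots ++ [((start : Int) + 1, (j : Int))] else shots)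
          = (if j < xs.length then shots ++ [((start : Int) + 1, (j : Int))] else shots) := by
        by_cases hc : j < xs.length
        · rw [if_pos (hcond.mpr hc), if_pos hc]
        · rw [if_neg (fun hne => hc (hcond.mp hne)), if_neg hc]
      rw [hif]
      exact ih xs j (by omega) _
    · have hd : xs.drop i = [] := List.drop_eq_nil_of_le (by omega)
      rw [pvLoopB]
      simp [dif_neg h, hd, pvRunsLoop]

-- evaluation of A's step in each of its four reachable situations
theorem pvStepA_true_idle (shots : List (Int × Int)) (e i : Int) :
    pvStepA (shots, -1, e) (i, true) = (shots, i + 1, e) := by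
  simp [pvStepA]

theorem pvStepA_true_pos (shots : List (Int × Int)) (s e i : Int) (hs : 0 < s) :
    pvStepA (shots, s, e) (i, true) = (shots, s, e) := by
  simp [pvStepA]; omega

theorem pvStepA_false_idle (shots : List (Int × Int)) (e i : Int) :
    pvStepA (shots, -1, e) (i, false) = (shots, -1, e) := by
  simp [pvStepA]

theorem pvStepA_false_pos (shots : List (Int × Int)) (s e i : Int) (hs : 0 < s) :
    pvStepA (shots, s, e) (i, false) = (shots ++ [(s, i)], -1, -1) := by
  simp [pvStepA]; omega

-- folding A's step over an all-false run from the idle state does nothing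
theorem pvFoldA_false_run (fs : List Bool) (hfs : ∀ x ∈ fs, x = false) :
    ∀ (n : Int) (shots : List (Int × Int)),
      (PySem.List.enumerate fs n).foldl pvStepA (shots, -1, -1) = (shots, -1, -1) := by
  induction fs with
  | nil => intro n shots; simp [PySem.List.enumerate_nil]
  | cons x t ih =>
    intro n shots
    have hx : x = false := hfs x (by simp)
    have ht : ∀ y ∈ t, y = false := fun y hy => hfs y (by simp [hy])
    rw [PySem.List.enumerate_cons, List.foldl_cons, hx, pvStepA_false_idle]
    exact ih ht (n + 1) shots

-- folding A's step over an all-true run while a start is recorded does nothing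
theorem pvFoldA_true_run (ts : List Bool) (hts : ∀ x ∈ ts, x = true) :
    ∀ (n s e : Int) (shots : List (Int × Int)), 0 < s →
      (PySem.List.enumerate ts n).foldl pvStepA (shots, s, e) = (shots, s, e) := by
  induction ts with
  | nil => intro n s e shots _; simp [PySem.List.enumerate_nil]
  | cons x t ih =>
    intro n s e shots hs
    have hx : x = true := hts x (by simp)
    have ht : ∀ y ∈ t, y = true := fun y hy => hts y (by simp [hy])
    rw [PySem.List.enumerate_cons, List.foldl_cons, hx, pvStepA_true_pos _ _ _ _ hs]
    exact ih ht (n + 1) s e shots hs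

-- head of a dropWhile fails the predicate
theorem pvHead_dropWhile (p : Bool → Bool) (l : List Bool) (y : Bool) (tt : List Bool)
    (h : l.dropWhile p = y :: tt) : p y = false := by
  have := List.head_dropWhile_not (p := p) (l := l) (by simp [h])
  simpa [h] using this

-- the main invariant: A's fold from the idle state equals B's run loop
theorem pvMainAux : ∀ (N : Nat) (rest : List Bool), rest.length ≤ N →
    ∀ (shots : List (Int × Int)) (n : Int), 0 ≤ n →
    ((PySem.List.enumerate rest n).foldl pvStepA (shots, -1, -1)).1 = pvRunsLoop shots n rest := by
  intro N
  induction N with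
  | zero =>
    intro rest hlen shots n hn
    have hnil : rest = [] := List.eq_nil_of_length_eq_zero (Nat.le_zero.mp hlen)
    subst hnil
    simp [PySem.List.enumerate_nil, pvRunsLoop]
  | succ N ih =>
    intro rest hlen shots n hn
    cases rest with
    | nil => simp [PySem.List.enumerate_nil, pvRunsLoop]
    | cons x t =>
      rw [pvRunsLoop]
      simp only [pvSpan]
      have hsplit : x :: t
          = List.takeWhile (fun v => !v) (x :: t) ++ List.dropWhile (fun v => !v) (x :: t) :=
        (List.takeWhile_append_dropWhile).symm
      have hfsfalse : ∀ y ∈ List.takeWhile (fun v => !v) (x :: t), y = false := by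
        intro y hy
        have := List.mem_takeWhile_imp hy
        simpa using this
      have hle : (List.dropWhile (fun v => !v) (x :: t)).length ≤ N + 1 := by
        have := List.length_dropWhile_le (fun v => !v) (x :: t)
        simpa using le_trans this hlen
      conv_lhs => rw [hsplit]
      rw [PySem.List.enumerate_append, List.foldl_append, pvFoldA_false_run _ hfsfalse]
      have hm : 0 ≤ n + ((List.takeWhile (fun v => !v) (x :: t)).length : Int) := by positivity
      generalize hgm : n + ((List.takeWhile (fun v => !v) (x :: t)).length : Int) = m at hm ⊢
      rcases hq : List.dropWhile (fun v => !v) (x :: t) with _ | ⟨y, tt⟩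
      · simp [PySem.List.enumerate_nil, pvRunsLoop]
      · have hy : y = true := by
          have h := pvHead_dropWhile (fun v => !v) (x :: t) y tt hq
          simpa using h
        subst hy
        have hle2 : tt.length ≤ N := by
          have h1 := List.length_dropWhile_le (fun v => !v) (x :: t)
          rw [hq] at h1
          simp only [List.length_cons] at h1 hlen
          omega
        rw [PySem.List.enumerate_cons, List.foldl_cons, pvStepA_true_idle]
        have httrue : ∀ z ∈ List.takeWhile (fun v => v) tt, z = true := by
          intro z hz
          exact List.mem_takeWhile_imp hz
        have hsplit2 : tt = List.takeWhile (fun v => v) tt ++ List.dropWhile (fun v => v) tt :=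
          (List.takeWhile_append_dropWhile).symm
        conv_lhs => rw [hsplit2]
        rw [PySem.List.enumerate_append, List.foldl_append,
          pvFoldA_true_run _ httrue (m + 1) (m + 1) (-1) shots (by omega)]
        have e1 : List.takeWhile (fun v => v) (true :: tt)
            = true :: List.takeWhile (fun v => v) tt := by simp
        have e2 : List.dropWhile (fun v => v) (true :: tt)
            = List.dropWhile (fun v => v) tt := by simp
        rw [e1, e2]
        rcases hq2 : List.dropWhile (fun v => v) tt with _ | ⟨z, rr⟩
        · simp [PySem.List.enumerate_nil, pvRunsLoop]
        · have hz : z = false := by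
            have h := pvHead_dropWhile (fun v => v) tt z rr hq2
            simpa using h
          subst hz
          rw [PySem.List.enumerate_cons, List.foldl_cons,
            pvStepA_false_pos _ _ _ _ (by omega)]
          have hle3 : (false :: rr).length ≤ N := by
            have h1 := List.length_dropWhile_le (fun v => v) tt
            rw [hq2] at h1
            omega
          have hfold : List.foldl pvStepA
              (shots ++ [(m + 1, m + 1 + ((List.takeWhile (fun v => v) tt).length : Int))], -1, -1)
              (PySem.List.enumerate rr (m + 1 + ((List.takeWhile (fun v => v) tt).length : Int) + 1))
              = List.foldl pvStepA
              (shots ++ [(m + 1, m + 1 + ((List.takeWhile (fun v => v) tt).length : Int))], -1, -1)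
              (PySem.List.enumerate (false :: rr) (m + 1 + ((List.takeWhile (fun v => v) tt).length : Int))) := by
            rw [PySem.List.enumerate_cons, List.foldl_cons, pvStepA_false_idle]
          rw [hfold, ih (false :: rr) hle3 _ _ (by positivity)]
          have harith : m + 1 + ((List.takeWhile (fun v => v) tt).length : Int)
              = m + (((List.takeWhile (fun v => v) tt).length : Int) + 1) := by ring
          simp only [List.length_cons, Nat.cast_add, Nat.cast_one, harith]
          rw [if_pos (by simp)]

theorem pvMain (rest : List Bool) : ∀ (shots : List (Int × Int)) (n : Int), 0 ≤ n →
    ((PySem.List.enumerate rest n).foldl pvStepA (shots, -1, -1)).1 = pvRunsLoop shots n rest :=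
  fun shots n hn => pvMainAux rest.length rest le_rfl shots n hn


theorem getListOfShots_spec : Claim_equal_getListOfShots := by
  intro shotLabels _
  unfold Spec_getListOfShots getListOfShots getListOfShots_alt
  rw [pvBridgeAux shotLabels.length shotLabels 0 (by omega) []]
  simpa using pvMain shotLabels [] 0 le_rfl
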